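-- pv_equiv track=rewrite | github.com/jgilles23/advent2021 | day24.py | process
-- ===== SOURCE A (Python) =====
-- def process(equn, style, X):
--     if style == "up":
--         z = "9"
--         y = "1"
--     else:
--         z = "1"
--         y = "0"
--     q = [z if x in "abcdefghijklmn" else x for x in equn]
--     q = [str(X) if x in "ABCDEFGHIJKLMN" else x for x in q]
--     q = "".join(q)
--     while "~" in q:
--         i = q.find("~")
--         q = q[:i] + y + q[i+2:]
--     return q
-- ===== SOURCE B (Python) =====
-- def process(equn, style, X):
--     if style == "up":
--         z, y = "9", "1"
--     else:
--         z, y = "1", "0"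
--     s = "".join(z if c in "abcdefghijklmn" else str(X) if c in "ABCDEFGHIJKLMN" else c for c in equn)
--     out = []
--     i = 0
--     while i < len(s):
--         if s[i] == "~":
--             out.append(y)
--             i += 2
--         else:
--             out.append(s[i])
--             i += 1
--     return "".join(out)
-- ===== Notes on version B (the rewrite author's own statement) =====
-- stated objective: simpler
-- what changed: A rebuilds the whole string with find and slicing once per '~'; B substitutes in a single comprehension and replaces tilde-pairs in one forward index scan that appends to a result list.
import Mathlib
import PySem

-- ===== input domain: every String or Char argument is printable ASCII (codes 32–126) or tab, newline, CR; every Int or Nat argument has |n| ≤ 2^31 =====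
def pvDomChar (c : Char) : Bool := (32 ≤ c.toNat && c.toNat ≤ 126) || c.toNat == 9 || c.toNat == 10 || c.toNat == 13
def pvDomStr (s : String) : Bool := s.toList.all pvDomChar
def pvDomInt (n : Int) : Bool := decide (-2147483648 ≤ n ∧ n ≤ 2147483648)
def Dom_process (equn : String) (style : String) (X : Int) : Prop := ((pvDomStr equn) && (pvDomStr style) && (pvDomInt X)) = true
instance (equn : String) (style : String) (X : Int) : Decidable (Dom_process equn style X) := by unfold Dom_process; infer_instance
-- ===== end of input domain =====

-- B replaces A's repeated find-and-rebuild '~' loop by a single index scan over the substituted string (objective: simpler).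
-- String operations are ported over List Char (exact under the PySem convention).

-- ===== PORT A =====
-- the 'while "~" in q' loop of A: q = q[:i] + y + q[i+2:] at i = q.find("~");
-- y is '1' or '0' in A, the hypothesis y ≠ '~' only justifies termination
def tilLoop (y : Char) (hy : y ≠ '~') (q : List Char) : List Char :=
  if h : '~' ∈ q then
    let i := q.idxOf '~'
    tilLoop y hy (q.take i ++ y :: q.drop (i+2))
  else q
termination_by q.count '~'
decreasing_by
  have hi : q.idxOf '~' < q.length := List.idxOf_lt_length_of_mem h
  have htake : '~' ∉ q.take (q.idxOf '~') := by
    intro hm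
    have := (List.mem_take_iff_idxOf_lt h).mp hm
    omega
  have hdrop : q.drop (q.idxOf '~') = '~' :: q.drop (q.idxOf '~' + 1) := by
    rw [List.drop_eq_getElem_cons hi, List.getElem_idxOf hi]
  have hc2 : (q.drop (q.idxOf '~' + 1)).count '~' ≥ (q.drop (q.idxOf '~' + 2)).count '~' := by
    have : q.drop (q.idxOf '~' + 2) = (q.drop (q.idxOf '~' + 1)).drop 1 := by
      rw [List.drop_drop]
    rw [this]
    exact (List.drop_sublist _ _).count_le '~'
  have hsplit : q.count '~' = (q.take (q.idxOf '~')).count '~' + (q.drop (q.idxOf '~')).count '~' := by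
    conv_lhs => rw [← List.take_append_drop (q.idxOf '~') q]
    rw [List.count_append]
  rw [hsplit, hdrop]
  simp only [List.count_append, List.count_cons, List.count_eq_zero.mpr htake]
  simp [hy]
  omega

def process (equn : String) (style : String) (X : Int) : String :=
  let z : Char := if style = "up" then '9' else '1'
  let y : Char := if style = "up" then '1' else '0'
  have hy : y ≠ '~' := by dsimp only [y]; split <;> decide
  -- first comprehension: lowercase a..n ↦ z
  let q1 : List Char := equn.toList.map (fun x => if x ∈ "abcdefghijklmn".toList then z else x)
  -- second comprehension: uppercase A..N ↦ str(X) (a multi-char string), then "".join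
  let q2 : List (List Char) := q1.map (fun x => if x ∈ "ABCDEFGHIJKLMN".toList then (PySem.Int.toStr X).toList else [x])
  let q : List Char := q2.flatten
  String.mk (tilLoop y hy q)

-- ===== PORT B =====
-- B's index scan: s[i] == '~' → append y, i += 2; else append s[i], i += 1
def scanB (y : Char) : List Char → List Char
  | [] => []
  | c :: rest =>
    if c = '~' then y :: scanB y (rest.drop 1)
    else c :: scanB y rest
termination_by l => l.length
decreasing_by
  · simp only [List.length_cons, List.length_drop]; omega
  · simp

def process_alt (equn : String) (style : String) (X : Int) : String :=
  let z : Char := if style = "up" then '9' else '1'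
  let y : Char := if style = "up" then '1' else '0'
  let s : List Char := (equn.toList.map
    (fun c => if c ∈ "abcdefghijklmn".toList then [z]
              else if c ∈ "ABCDEFGHIJKLMN".toList then (PySem.Int.toStr X).toList
              else [c])).flatten
  String.mk (scanB y s)

-- ===== PRECONDITION & SPEC =====
def Spec_process (equn : String) (style : String) (X : Int) (out : String) : Prop := out = process_alt equn style X
instance (equn : String) (style : String) (X : Int) (out : String) : Decidable (Spec_process equn style X out) := by unfold Spec_process; infer_instance

-- ===== CLAIM (what is proved, stated in full; the proofs are below) =====
def Claim_equal_process : Prop := ∀ (equn : String) (style : String) (X : Int), Dom_process equn style X → Spec_process equn style X (process equn style X)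

-- ===== LEMMAS AND PROOFS =====

theorem scanB_no_tilde (y : Char) (q : List Char) (h : '~' ∉ q) : scanB y q = q := by
  induction q with
  | nil => simp [scanB]
  | cons c rest ih =>
    have hc : c ≠ '~' := fun hc => h (hc ▸ List.mem_cons_self)
    rw [scanB, if_neg hc, ih (fun hm => h (List.mem_cons_of_mem _ hm))]

theorem scanB_append (y : Char) (a t : List Char) (ha : '~' ∉ a) :
    scanB y (a ++ t) = a ++ scanB y t := by
  induction a with
  | nil => simp
  | cons c rest ih =>
    have hc : c ≠ '~' := fun hc => ha (hc ▸ List.mem_cons_self)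
    rw [List.cons_append, scanB, if_neg hc, ih (fun hm => ha (List.mem_cons_of_mem _ hm))]
    rfl

theorem tilLoop_eq_scanB (y : Char) (hy : y ≠ '~') (q : List Char) :
    tilLoop y hy q = scanB y q := by
  induction q using tilLoop.induct y hy with
  | case2 q h => rw [tilLoop, dif_neg h, scanB_no_tilde y q h]
  | case1 q h i ih =>
    rw [tilLoop, dif_pos h]
    rw [ih]
    have hi : q.idxOf '~' < q.length := List.idxOf_lt_length_of_mem h
    have htake : '~' ∉ q.take (q.idxOf '~') := by
      intro hm
      have := (List.mem_take_iff_idxOf_lt h).mp hm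
      omega
    have hdrop : q.drop (q.idxOf '~') = '~' :: q.drop (q.idxOf '~' + 1) := by
      rw [List.drop_eq_getElem_cons hi, List.getElem_idxOf hi]
    have hd2 : q.drop (q.idxOf '~' + 2) = (q.drop (q.idxOf '~' + 1)).drop 1 := by
      rw [List.drop_drop]
    show scanB y (q.take (q.idxOf '~') ++ y :: q.drop (q.idxOf '~' + 2)) = scanB y q
    conv_rhs => rw [← List.take_append_drop (q.idxOf '~') q, hdrop]
    rw [scanB_append y _ _ htake, scanB_append y _ _ htake]
    congr 1
    simp only [scanB]
    simp [hy, ← hd2]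

theorem subst_eq (z : Char) (hz : z ∉ "ABCDEFGHIJKLMN".toList) (X : Int) (l : List Char) :
    (l.map (fun x => if x ∈ "abcdefghijklmn".toList then z else x)).map
      (fun x => if x ∈ "ABCDEFGHIJKLMN".toList then (PySem.Int.toStr X).toList else [x])
    = l.map (fun c => if c ∈ "abcdefghijklmn".toList then [z]
              else if c ∈ "ABCDEFGHIJKLMN".toList then (PySem.Int.toStr X).toList
              else [c]) := by
  rw [List.map_map]
  apply List.map_congr_left
  intro c _
  simp only [Function.comp_apply]
  by_cases h1 : c ∈ "abcdefghijklmn".toList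
  · rw [if_pos h1, if_neg hz, if_pos h1]
  · rw [if_neg h1, if_neg h1]

theorem ports_eq (equn : String) (X : Int) (z y : Char) (hy : y ≠ '~')
    (hz : z ∉ "ABCDEFGHIJKLMN".toList) :
    String.mk (tilLoop y hy (((equn.toList.map
        (fun x => if x ∈ "abcdefghijklmn".toList then z else x)).map
        (fun x => if x ∈ "ABCDEFGHIJKLMN".toList then (PySem.Int.toStr X).toList else [x])).flatten))
    = String.mk (scanB y ((equn.toList.map
        (fun c => if c ∈ "abcdefghijklmn".toList then [z]
                  else if c ∈ "ABCDEFGHIJKLMN".toList then (PySem.Int.toStr X).toList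
                  else [c])).flatten)) := by
  rw [tilLoop_eq_scanB, subst_eq z hz X]

-- ===== VERDICT (by name: the statement is the Claim_ definition above) =====
theorem process_spec : Claim_equal_process := by
  intro equn style X _
  unfold Spec_process process process_alt
  exact ports_eq equn X _ _ _ (by split <;> decide)
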